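-- pv_equiv track=rewrite | github.com/taehoonlee04/english_as_code | src/eac/runtime/tools/excel.py | _normalize_range
-- ===== SOURCE A (Python) =====
-- def _normalize_range(range_spec: str) -> str:
--     """Turn A1G999 into A1:G999 for openpyxl."""
--     s = range_spec.strip().upper()
--     if ":" in s:
--         return s
--     if len(s) >= 2 and s[0].isalpha() and s[1].isdigit():
--         i = 1
--         while i < len(s) and s[i].isdigit():
--             i += 1
--         if i < len(s):
--             return s[:i] + ":" + s[i:]
--     return s
-- ===== SOURCE B (Python) =====
-- import re
--
-- # Shape "letter, digits, non-empty non-digit tail" as one regex instead of a manual index scan.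
-- _SPLIT_RX = re.compile(r'([A-Z][0-9]+)([^0-9].*)', re.DOTALL)
--
--
-- def _normalize_range(range_spec: str) -> str:
--     """Turn A1G999 into A1:G999 for openpyxl."""
--     s = range_spec.strip().upper()
--     if ":" in s:
--         return s
--     m = _SPLIT_RX.fullmatch(s)
--     if m:
--         return m.group(1) + ":" + m.group(2)
--     return s
-- ===== Notes on version B (the rewrite author's own statement) =====
-- stated objective: idiomatic
-- what changed: Replaced A's manual character scan (index loop over isdigit chars plus slicing) with a single precompiled regex fullmatch of group [A-Z][0-9]+ followed by a non-empty non-digit-led rest, whose two groups are joined with a colon.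
import Mathlib
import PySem

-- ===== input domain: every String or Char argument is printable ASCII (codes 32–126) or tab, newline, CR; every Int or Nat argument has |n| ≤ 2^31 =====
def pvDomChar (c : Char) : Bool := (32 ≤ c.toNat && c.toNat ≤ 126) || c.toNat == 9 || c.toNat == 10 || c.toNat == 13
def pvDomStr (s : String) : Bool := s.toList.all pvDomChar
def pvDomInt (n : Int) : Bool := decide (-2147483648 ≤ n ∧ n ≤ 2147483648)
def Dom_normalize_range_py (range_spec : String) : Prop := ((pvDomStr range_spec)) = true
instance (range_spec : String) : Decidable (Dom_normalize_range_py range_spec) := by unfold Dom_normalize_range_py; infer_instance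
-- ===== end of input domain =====

-- B replaces A's manual index-scan over the string with a single regex-shaped split
-- (group [A-Z][0-9]+, then a non-empty non-digit-led rest); objective: idiomatic, same cost.

-- ===== PORT A =====
-- A's `while i < len(s) and s[i].isdigit(): i += 1`
def pvAScan (cs : List Char) (i : Nat) : Nat :=
  if h : i < cs.length then
    if PySem.Chars.isdigit cs[i] then pvAScan cs (i + 1) else i
  else i
termination_by cs.length - i
decreasing_by omega


def normalize_range_py (range_spec : String) : String :=
  let s := PySem.Str.upper (PySem.Str.strip range_spec)
  if PySem.Str.isIn ":" s then s
  else
    let cs := s.toList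
    if 2 ≤ cs.length
        && (PySem.List.pyGet? cs 0).elim false PySem.Chars.isalpha
        && (PySem.List.pyGet? cs 1).elim false PySem.Chars.isdigit then
      let i := pvAScan cs 1
      if i < cs.length then
        String.ofList (PySem.List.slice cs none (some (i : Int)) ++ [':'] ++ PySem.List.slice cs (some (i : Int)) none)
      else s
    else s


-- ===== PORT B =====
-- Source B's regex character class [0-9]
def pvDigitB (c : Char) : Bool := decide ('0' ≤ c) && decide (c ≤ '9')


-- fullmatch of ([A-Z][0-9]+)([^0-9].*) with DOTALL: returns the two groups, or none
def pvSplitRx (cs : List Char) : Option (List Char × List Char) :=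
  match cs with
  | [] => none
  | c :: rest =>
    let ds := rest.takeWhile pvDigitB
    let tl := rest.dropWhile pvDigitB
    if decide ('A' ≤ c) && decide (c ≤ 'Z') && !ds.isEmpty && !tl.isEmpty then
      some (c :: ds, tl)
    else none

def normalize_range_py_alt (range_spec : String) : String :=
  let s := PySem.Str.upper (PySem.Str.strip range_spec)
  if PySem.Str.isIn ":" s then s
  else
    match pvSplitRx s.toList with
    | some (g1, g2) => String.ofList (g1 ++ ':' :: g2)
    | none => s


-- ===== PRECONDITION & SPEC =====
def Spec_normalize_range_py (range_spec : String) (out : String) : Prop := out = normalize_range_py_alt range_spec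
instance (range_spec : String) (out : String) : Decidable (Spec_normalize_range_py range_spec out) := by unfold Spec_normalize_range_py; infer_instance

-- ===== CLAIM (what is proved, stated in full; the proofs are below) =====
def Claim_equal_normalize_range_py : Prop := ∀ (range_spec : String), Dom_normalize_range_py range_spec → Spec_normalize_range_py range_spec (normalize_range_py range_spec)

-- ===== LEMMAS AND PROOFS =====

lemma char_toNat_ofNat (n : Nat) (h : n.isValidChar) : (Char.ofNat n).toNat = n := by
  simp [Char.ofNat, h, Char.toNat, Char.ofNatAux]

lemma char_le_iff (a b : Char) : a ≤ b ↔ a.toNat ≤ b.toNat := by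
  rw [Char.le_def]; exact UInt32.le_iff_toNat_le

lemma islower_upperChar (x : Char) : PySem.Chars.islower (PySem.Chars.upperChar x) = false := by
  simp only [PySem.Chars.upperChar, PySem.Chars.islower]
  split
  · rename_i h
    simp only [Bool.and_eq_true, decide_eq_true_eq, char_le_iff] at h
    have h97 : (97:Nat) ≤ x.toNat := h.1
    have h122 : x.toNat ≤ 122 := h.2
    have hv : (x.toNat - 32).isValidChar := Or.inl (by omega)
    have ht := char_toNat_ofNat (x.toNat - 32) hv
    simp only [Bool.and_eq_false_iff, decide_eq_false_iff_not, char_le_iff, ht]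
    left
    have ha : ('a').toNat = 97 := rfl
    omega
  · rename_i h
    simpa using h

lemma isalpha_of_upper (x : Char) :
    PySem.Chars.isalpha (PySem.Chars.upperChar x)
      = (decide ('A' ≤ PySem.Chars.upperChar x) && decide (PySem.Chars.upperChar x ≤ 'Z')) := by
  simp [PySem.Chars.isalpha, PySem.Chars.isupper, islower_upperChar]

lemma pvAScan_eq (cs : List Char) (i : Nat) :
    pvAScan cs i = i + ((cs.drop i).takeWhile PySem.Chars.isdigit).length := by
  fun_induction pvAScan cs i with
  | case1 i h hd ih =>
    rw [ih, List.drop_eq_getElem_cons h, List.takeWhile_cons_of_pos hd]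
    simp; omega
  | case2 i h hd =>
    rw [List.drop_eq_getElem_cons h, List.takeWhile_cons_of_neg (by simp [hd])]
    simp
  | case3 i h =>
    rw [List.drop_eq_nil_of_le (by omega)]
    simp


lemma ports_agree (rs : String) : normalize_range_py rs = normalize_range_py_alt rs := by
  unfold normalize_range_py normalize_range_py_alt
  set s := PySem.Str.upper (PySem.Str.strip rs) with hs
  by_cases hc : PySem.Str.isIn ":" s = true
  · rw [if_pos hc, if_pos hc]
  · have hlist : s.toList = (PySem.Chars.strip rs.toList).map PySem.Chars.upperChar := by
      simp [hs, PySem.Str.upper, PySem.Str.strip, PySem.Chars.upper]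
    rw [if_neg hc, if_neg hc]
    cases hcs : s.toList with
    | nil => simp [pvSplitRx]
    | cons c rest =>
      obtain ⟨x, -, hx⟩ : ∃ x, x ∈ PySem.Chars.strip rs.toList ∧ PySem.Chars.upperChar x = c := by
        have : c ∈ s.toList := by rw [hcs]; simp
        rw [hlist] at this; exact List.mem_map.mp this
      have halpha : PySem.Chars.isalpha c = (decide ('A' ≤ c) && decide (c ≤ 'Z')) := by
        rw [← hx]; exact isalpha_of_upper x
      have hdig : pvDigitB = PySem.Chars.isdigit := rfl
      by_cases hAZ : (decide ('A' ≤ c) && decide (c ≤ 'Z')) = true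
      · cases rest with
        | nil =>
          simp [pvSplitRx, PySem.List.pyGet?, PySem.List.pyIdx?]
        | cons d rest' =>
          by_cases hd : PySem.Chars.isdigit d = true
          · -- guard true on both sides
            have h0 : PySem.List.pyGet? (c :: d :: rest') (0 : Int) = some c := by
              simpa using PySem.List.pyGet?_natCast (c :: d :: rest') 0
            have h1 : PySem.List.pyGet? (c :: d :: rest') (1 : Int) = some d := by
              simpa using PySem.List.pyGet?_natCast (c :: d :: rest') 1
            have hga : (decide (2 ≤ (c :: d :: rest').length)
                && (PySem.List.pyGet? (c :: d :: rest') (0 : Int)).elim false PySem.Chars.isalpha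
                && (PySem.List.pyGet? (c :: d :: rest') (1 : Int)).elim false PySem.Chars.isdigit) = true := by
              simp only [h0, h1, Option.elim, halpha, hAZ, hd, List.length_cons,
                Bool.and_true, decide_eq_true_eq]
              omega
            rw [if_pos hga]
            have hscan : pvAScan (c :: d :: rest') 1
                = 1 + ((d :: rest').takeWhile PySem.Chars.isdigit).length := by
              rw [pvAScan_eq]; rfl
            have htwc : (d :: rest').takeWhile PySem.Chars.isdigit
                = d :: rest'.takeWhile PySem.Chars.isdigit :=
              List.takeWhile_cons_of_pos hd
            have hdwc : (d :: rest').dropWhile PySem.Chars.isdigit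
                = rest'.dropWhile PySem.Chars.isdigit :=
              List.dropWhile_cons_of_pos hd
            have hrest : rest' = rest'.takeWhile PySem.Chars.isdigit ++ rest'.dropWhile PySem.Chars.isdigit :=
              (List.takeWhile_append_dropWhile).symm
            have hlen : (rest'.takeWhile PySem.Chars.isdigit).length
                + (rest'.dropWhile PySem.Chars.isdigit).length = rest'.length := by
              rw [← List.length_append, ← hrest]
            cases hdwcase : rest'.dropWhile PySem.Chars.isdigit with
            | nil =>
              have hlen0 : (rest'.dropWhile PySem.Chars.isdigit).length = 0 := by
                rw [hdwcase]; rfl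
              have hi : ¬ (pvAScan (c :: d :: rest') 1 < (c :: d :: rest').length) := by
                rw [hscan, htwc]
                simp only [List.length_cons]
                omega
              have hrx : pvSplitRx (c :: d :: rest') = none := by
                simp [pvSplitRx, hdig, htwc, hdwc, hdwcase]
              rw [if_neg hi, hrx]
            | cons e dw' =>
              have hlenc : (rest'.dropWhile PySem.Chars.isdigit).length = dw'.length + 1 := by
                rw [hdwcase]; rfl
              have hi : pvAScan (c :: d :: rest') 1 < (c :: d :: rest').length := by
                rw [hscan, htwc]
                simp only [List.length_cons]
                omega
              have hrx : pvSplitRx (c :: d :: rest')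
                  = some (c :: d :: rest'.takeWhile PySem.Chars.isdigit, rest'.dropWhile PySem.Chars.isdigit) := by
                simp [pvSplitRx, hdig, htwc, hdwc, hdwcase, hAZ]
              rw [if_pos hi, hrx]
              rw [hscan, htwc]
              have hA1 := PySem.List.slice_to_natCast (c :: d :: rest')
                (1 + (d :: rest'.takeWhile PySem.Chars.isdigit).length)
              have hA2 := PySem.List.slice_from_natCast (c :: d :: rest')
                (1 + (d :: rest'.takeWhile PySem.Chars.isdigit).length)
              rw [hA1, hA2]
              have hsplit : (c :: d :: rest')
                  = (c :: d :: rest'.takeWhile PySem.Chars.isdigit) ++ rest'.dropWhile PySem.Chars.isdigit := by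
                conv_lhs => rw [hrest]
                rfl
              have hlen2 : 1 + (d :: rest'.takeWhile PySem.Chars.isdigit).length
                  = (c :: d :: rest'.takeWhile PySem.Chars.isdigit).length := by
                simp only [List.length_cons]; omega
              rw [hsplit, hlen2, List.take_left, List.drop_left]
              simp
          · -- second char not a digit: both fall through to s
            rw [if_neg (by
              simp [PySem.List.pyGet?, PySem.List.pyIdx?]
              intro _
              simpa using hd)]
            have hrx : pvSplitRx (c :: d :: rest') = none := by
              simp [pvSplitRx, hdig, List.takeWhile_cons_of_neg (p := PySem.Chars.isdigit) (by simpa using hd)]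
            rw [hrx]
      · -- head not in A-Z: both fall through to s
        rw [if_neg (by
          simp [PySem.List.pyGet?, PySem.List.pyIdx?]
          intro _ hca
          exact absurd (halpha ▸ hca) hAZ)]
        have hrx : pvSplitRx (c :: rest) = none := by
          simp [pvSplitRx, Bool.eq_false_iff.mpr hAZ]
        rw [hrx]

-- ===== VERDICT (by name: the statement is the Claim_ definition above) =====
theorem normalize_range_py_spec : Claim_equal_normalize_range_py := by
  intro rs _
  unfold Spec_normalize_range_py
  exact ports_agree rs
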